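-- pv_equiv track=rewrite | github.com/ayushkhaitanrutgers/decompositions-2 | experiments.py | _latex_frac_to_parens2
-- ===== SOURCE A (Python) =====
-- def _latex_frac_to_parens2(s: str) -> str:
--     """Alternative implementation using find() to robustly convert nested \frac."""
--     i = 0
--     out = ''
--     while True:
--         pos = s.find('\\frac{', i)
--         if pos == -1:
--             out += s[i:]
--             break
--         out += s[i:pos]
--         j = pos + len('\\frac')
--         if j >= len(s) or s[j] != '{':
--             out += '\\frac'
--             i = j
--             continue
--         # Read A
--         depth = 0
--         a_start = j + 1
--         k = a_start
--         while k < len(s):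
--             if s[k] == '{':
--                 depth += 1
--             elif s[k] == '}':
--                 if depth == 0:
--                     a_end = k
--                     k += 1
--                     break
--                 depth -= 1
--             k += 1
--         else:
--             raise ValueError('Unbalanced braces in \\frac A')
--         if k >= len(s) or s[k] != '{':
--             raise ValueError('Expected second group in \\frac')
--         # Read B
--         depth = 0
--         b_start = k + 1
--         m = b_start
--         while m < len(s):
--             if s[m] == '{':
--                 depth += 1
--             elif s[m] == '}':
--                 if depth == 0:
--                     b_end = m
--                     m += 1
--                     break
--                 depth -= 1
--             m += 1
--         else:
--             raise ValueError('Unbalanced braces in \\frac B')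
--         A = s[a_start:a_end]
--         B = s[b_start:b_end]
--         out += f'({A})/({B})'
--         i = m
--     return out
-- ===== SOURCE B (Python) =====
-- def _latex_frac_to_parens2(s: str) -> str:
--     """Two staged passes: a stack pass precomputes every matched '{'->'}' pair,
--     then a char-by-char copy pass converts each \\frac{A}{B} by table lookup
--     (no find(), no inline depth counting)."""
--     match = {}
--     stack = []
--     for q, ch in enumerate(s):
--         if ch == '{':
--             stack.append(q)
--         elif ch == '}':
--             if stack:
--                 match[stack.pop()] = q
--     out = []
--     i = 0
--     n = len(s)
--     while i < n:
--         if s.startswith('\\frac{', i):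
--             j = i + 5  # index of the '{' just matched
--             q = match.get(j)
--             if q is None:
--                 raise ValueError('Unbalanced braces in \\frac A')
--             if q + 1 >= n or s[q + 1] != '{':
--                 raise ValueError('Expected second group in \\frac')
--             r = match.get(q + 1)
--             if r is None:
--                 raise ValueError('Unbalanced braces in \\frac B')
--             out.append('(' + s[j + 1:q] + ')/(' + s[q + 2:r] + ')')
--             i = r + 1
--         else:
--             out.append(s[i])
--             i += 1
--     return ''.join(out)
-- ===== Notes on version B (the rewrite author's own statement) =====
-- stated objective: alternative
-- what changed: A jumps with find() and rescans each \frac's groups with inline depth-counting loops; B is two staged passes: a stack pass that precomputes a dict mapping every matched '{' position to its '}' position, then a char-by-char copy pass that converts each \frac{A}{B} by two table lookups (and drops A's dead 's[j] != {' re-check).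
-- outside the precondition, e.g. on _latex_frac_to_parens2('\\frac{x'): A raises ValueError, B raises ValueError; on _latex_frac_to_parens2('\\frac{x}y'): A raises ValueError, B raises ValueError; on _latex_frac_to_parens2('b\\frac{\\frac{}}{}ab}'): A returns 'b(\\frac{})/()ab}', B returns 'b(\\frac{})/()ab}'
import Mathlib
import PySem

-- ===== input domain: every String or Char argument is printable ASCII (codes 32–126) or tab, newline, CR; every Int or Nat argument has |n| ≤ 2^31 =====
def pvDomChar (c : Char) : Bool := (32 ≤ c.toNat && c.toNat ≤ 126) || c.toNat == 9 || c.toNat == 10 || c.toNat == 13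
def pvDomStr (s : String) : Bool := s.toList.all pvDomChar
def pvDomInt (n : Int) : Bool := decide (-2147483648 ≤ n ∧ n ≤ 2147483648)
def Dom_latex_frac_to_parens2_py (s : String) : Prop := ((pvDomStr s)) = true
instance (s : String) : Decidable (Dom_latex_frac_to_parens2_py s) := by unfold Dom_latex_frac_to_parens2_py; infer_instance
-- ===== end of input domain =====

-- B replaces A's find()-driven loop with inline depth-counting rescans by two staged passes:
-- a stack pass precomputing a dictionary of all matched '{'→'}' positions, then a char-by-char
-- copy pass converting each \frac{A}{B} by table lookup (alternative decomposition, same value;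
-- both raise ValueError on the same inputs, excluded by Pre_).

-- ===== PORT A =====
def pvFracPat : List Char := ['\\', 'f', 'r', 'a', 'c', '{']
def pvFracName : List Char := ['\\', 'f', 'r', 'a', 'c']

-- A's inner depth-counting scan (both `while k < len(s)` loops); `none` = fell off the end (raise).
def pvScanA (cs : List Char) (k d : Nat) : Option Nat :=
  if h : k < cs.length then
    if cs[k] = '{' then pvScanA cs (k + 1) (d + 1)
    else if cs[k] = '}' then
      if d = 0 then some k else pvScanA cs (k + 1) (d - 1)
    else pvScanA cs (k + 1) d
  else none
termination_by cs.length - k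

-- A's `while True` loop; fuel only makes the loop total (i grows every iteration), on a raise it returns `out` (excluded by Pre_).
def pvGoA (cs : List Char) (fuel i : Nat) (out : List Char) : List Char :=
  match fuel with
  | 0 => out
  | fuel + 1 =>
    let pos := PySem.Chars.findFrom cs pvFracPat (i : Int) none
    if pos = -1 then out ++ PySem.List.slice cs (some (i : Int)) none
    else
      let out2 := out ++ PySem.List.slice cs (some (i : Int)) (some pos)
      let j := pos.toNat + 5
      if cs.length ≤ j ∨ cs.getD j ' ' ≠ '{' then pvGoA cs fuel j (out2 ++ pvFracName)
      else
        match pvScanA cs (j + 1) 0 with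
        | none => out2  -- raise ValueError('Unbalanced braces in \frac A')
        | some aEnd =>
          let k := aEnd + 1
          if cs.length ≤ k ∨ cs.getD k ' ' ≠ '{' then out2  -- raise ValueError('Expected second group in \frac')
          else
            match pvScanA cs (k + 1) 0 with
            | none => out2  -- raise ValueError('Unbalanced braces in \frac B')
            | some bEnd =>
              pvGoA cs fuel (bEnd + 1)
                (out2 ++ ['('] ++ PySem.List.slice cs (some ((j + 1 : Nat) : Int)) (some (aEnd : Int))
                      ++ [')', '/', '('] ++ PySem.List.slice cs (some ((k + 1 : Nat) : Int)) (some (bEnd : Int)) ++ [')'])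

def latex_frac_to_parens2_py (s : String) : String :=
  String.ofList (pvGoA s.toList (s.toList.length + 1) 0 [])

-- ===== PORT B =====
-- the substring cs[a:b] (used by B's startswith test and by Pre_)
def pvSeg (cs : List Char) (a b : Nat) : List Char := (cs.take b).drop a

-- B's first pass: stack over enumerate(s), building the dict of matched '{'→'}' positions.
def pvBuild (cs : List Char) (n : Nat) (stack : List Nat) (tbl : PySem.Dict Nat Nat) : PySem.Dict Nat Nat :=
  if h : n < cs.length then
    if cs[n] = '{' then pvBuild cs (n + 1) (n :: stack) tbl
    else if cs[n] = '}' then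
      match stack with
      | [] => pvBuild cs (n + 1) [] tbl
      | p :: rest => pvBuild cs (n + 1) rest (tbl.insert p n)
    else pvBuild cs (n + 1) stack tbl
  else tbl
termination_by cs.length - n

-- B's `while i < n` copy pass; s.startswith('\frac{', i) is ported exactly as s[i:i+6] = pattern;
-- fuel only makes the loop total, on a raise it returns `out` (excluded by Pre_).
def pvGoB (cs : List Char) (tbl : PySem.Dict Nat Nat) (fuel i : Nat) (out : List Char) : List Char :=
  match fuel with
  | 0 => out
  | fuel + 1 =>
    if h : i < cs.length then
      if pvSeg cs i (i + 6) = pvFracPat then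
        let j := i + 5
        match tbl.get? j with
        | none => out  -- raise ValueError('Unbalanced braces in \frac A')
        | some q =>
          if cs.length ≤ q + 1 ∨ cs.getD (q + 1) ' ' ≠ '{' then out  -- raise ValueError('Expected second group in \frac')
          else
            match tbl.get? (q + 1) with
            | none => out  -- raise ValueError('Unbalanced braces in \frac B')
            | some r =>
              pvGoB cs tbl fuel (r + 1)
                (out ++ ['('] ++ PySem.List.slice cs (some ((j + 1 : Nat) : Int)) (some (q : Int))
                      ++ [')', '/', '('] ++ PySem.List.slice cs (some ((q + 2 : Nat) : Int)) (some (r : Int)) ++ [')'])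
      else pvGoB cs tbl fuel (i + 1) (out ++ [cs[i]])
    else out

def latex_frac_to_parens2_py_alt (s : String) : String :=
  String.ofList (pvGoB s.toList (pvBuild s.toList 0 [] PySem.Dict.empty) (s.toList.length + 1) 0 [])

-- ===== PRECONDITION & SPEC =====
-- q closes an (imaginary) '{' just before position k at nesting depth d
def pvIsClose (cs : List Char) (k d q : Nat) : Bool :=
  decide (k ≤ q) && (cs.getD q ' ' == '}') && ((pvSeg cs k q).count '}' == (pvSeg cs k q).count '{' + d)
-- the matching '}' of the '{' at position k-1: first q with cs[q]='}' and cs[k:q] brace-balanced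
def pvFindClose (cs : List Char) (k d : Nat) : Option Nat :=
  (List.range cs.length).find? (pvIsClose cs k d)
-- the '\frac{' starting at p is followed by two well-braced groups
def pvFracOk (cs : List Char) (p : Nat) : Bool :=
  match pvFindClose cs (p + 6) 0 with
  | none => false
  | some q => (cs.getD (q + 1) ' ' == '{') && (pvFindClose cs (q + 2) 0).isSome

-- Pre_ excludes exactly the inputs containing an occurrence of '\frac{' not followed by two
-- well-braced groups: on such inputs A either raises ValueError (when that occurrence is reached)
-- or, when the malformed occurrence lies inside another \frac's braces, A copies it verbatim and
-- B returns the same string anyway — the closed-form condition cannot tell the two apart.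
def Pre_latex_frac_to_parens2_py (s : String) : Prop :=
  ∀ p, p < s.toList.length → pvSeg s.toList p (p + 6) = pvFracPat → pvFracOk s.toList p = true

instance (s : String) : Decidable (Pre_latex_frac_to_parens2_py s) := by
  unfold Pre_latex_frac_to_parens2_py; infer_instance

def pvWitness_latex_frac_to_parens2_py : String := "x\\frac{a+1}{b{c}d}y"

def Spec_latex_frac_to_parens2_py (s : String) (out : String) : Prop := out = latex_frac_to_parens2_py_alt s
instance (s : String) (out : String) : Decidable (Spec_latex_frac_to_parens2_py s out) := by
  unfold Spec_latex_frac_to_parens2_py; infer_instance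

-- ===== CLAIM (what is proved, stated in full; the proofs are below) =====
def Claim_equal_latex_frac_to_parens2_py : Prop :=
  ∀ (s : String), Dom_latex_frac_to_parens2_py s → Pre_latex_frac_to_parens2_py s →
    Spec_latex_frac_to_parens2_py s (latex_frac_to_parens2_py s)

-- ===== LEMMAS AND PROOFS =====

theorem pvGetD_eq (cs : List Char) (d : Char) {n : Nat} (h : n < cs.length) :
    cs.getD n d = cs[n] := by
  rw [List.getD_eq_getElem?_getD, List.getElem?_eq_getElem h]
  rfl

-- find? over List.range: characterisation of the first hit
theorem pvFind?_range_iff (p : Nat → Bool) (n k : Nat) :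
    (List.range n).find? p = some k ↔ k < n ∧ p k = true ∧ ∀ q, q < k → p q = false := by
  induction n generalizing p k with
  | zero =>
    constructor
    · intro h; simp at h
    · rintro ⟨h, -, -⟩; omega
  | succ n ih =>
    rw [List.range_succ_eq_map]
    cases hp0 : p 0 with
    | true =>
      have hstep : List.find? p (0 :: (List.range n).map (· + 1)) = some 0 := by
        simp [hp0]
      rw [hstep]
      constructor
      · intro h
        injection h with h
        subst h
        exact ⟨Nat.succ_pos n, hp0, fun q hq => absurd hq (Nat.not_lt_zero q)⟩
      · rintro ⟨hk, hpk, hq⟩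
        rcases Nat.eq_zero_or_pos k with rfl | hk0
        · rfl
        · have := hq 0 hk0
          rw [hp0] at this
          exact absurd this (by simp)
    | false =>
      have hstep : List.find? p (0 :: (List.range n).map (· + 1)) =
          List.find? p ((List.range n).map (· + 1)) := by
        simp [hp0]
      rw [hstep, List.find?_map]
      constructor
      · intro h
        cases ho : (List.range n).find? (p ∘ (· + 1)) with
        | none => rw [ho] at h; simp at h
        | some k' =>
          rw [ho, Option.map_some] at h
          injection h with h
          subst h
          rcases (ih (p ∘ (· + 1)) k').mp ho with ⟨h1, h2, h3⟩
          refine ⟨by omega, h2, ?_⟩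
          intro q hq
          rcases Nat.eq_zero_or_pos q with rfl | hq0
          · exact hp0
          · have := h3 (q - 1) (by omega)
            simp only [Function.comp] at this
            have e : q - 1 + 1 = q := by omega
            rw [e] at this
            exact this
      · rintro ⟨hk, hpk, hq⟩
        rcases Nat.eq_zero_or_pos k with rfl | hk0
        · exact absurd hpk (by simp [hp0])
        · have hko : (List.range n).find? (p ∘ (· + 1)) = some (k - 1) := by
            refine (ih (p ∘ (· + 1)) (k - 1)).mpr ⟨by omega, ?_, ?_⟩
            · simp only [Function.comp]
              have e : k - 1 + 1 = k := by omega
              rw [e]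
              exact hpk
            · intro q hqk
              simp only [Function.comp]
              exact hq (q + 1) (by omega)
          rw [hko, Option.map_some]
          exact congrArg some (by omega)

theorem pvFind?_range_none_iff (p : Nat → Bool) (n : Nat) :
    (List.range n).find? p = none ↔ ∀ q, q < n → p q = false := by
  rw [List.find?_eq_none]
  constructor
  · intro h q hq
    have := h q (List.mem_range.mpr hq)
    simpa using this
  · intro h x hx
    simp [h x (List.mem_range.mp hx)]

theorem pvFind?_range_congr (p p' : Nat → Bool) (n : Nat)
    (h : ∀ q, q < n → p q = p' q) :
    (List.range n).find? p = (List.range n).find? p' := by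
  cases hk : (List.range n).find? p' with
  | none =>
    rw [pvFind?_range_none_iff] at hk ⊢
    intro q hq; rw [h q hq]; exact hk q hq
  | some k =>
    rw [pvFind?_range_iff] at hk ⊢
    obtain ⟨h1, h2, h3⟩ := hk
    exact ⟨h1, by rw [h k h1]; exact h2, fun q hq => by rw [h q (by omega)]; exact h3 q hq⟩

theorem pvIsClose_iff (cs : List Char) (k d q : Nat) :
    pvIsClose cs k d q = true ↔
      k ≤ q ∧ cs.getD q ' ' = '}' ∧ (pvSeg cs k q).count '}' = (pvSeg cs k q).count '{' + d := by
  simp [pvIsClose, and_assoc, List.getD_eq_getElem?_getD]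

theorem pvIsClose_false (cs : List Char) (k d q : Nat)
    (h : ¬ (k ≤ q ∧ cs.getD q ' ' = '}' ∧ (pvSeg cs k q).count '}' = (pvSeg cs k q).count '{' + d)) :
    pvIsClose cs k d q = false := by
  rw [Bool.eq_false_iff, Ne, pvIsClose_iff]; exact h

theorem pvFindClose_eq_some_iff (cs : List Char) (k d q : Nat) :
    pvFindClose cs k d = some q ↔
      q < cs.length ∧ pvIsClose cs k d q = true ∧ ∀ r, r < q → pvIsClose cs k d r = false :=
  pvFind?_range_iff _ _ _

theorem pvSeg_self (cs : List Char) (a : Nat) : pvSeg cs a a = [] := by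
  apply List.drop_eq_nil_of_le; simp

theorem pvSeg_cons (cs : List Char) {k q : Nat} (hk : k < cs.length) (hkq : k < q) :
    pvSeg cs k q = cs[k] :: pvSeg cs (k + 1) q := by
  unfold pvSeg
  have h1 : k < (cs.take q).length := by simp; omega
  rw [List.drop_eq_getElem_cons h1, List.getElem_take]

theorem pvSeg_snoc (cs : List Char) {a n : Nat} (ha : a ≤ n) (hn : n < cs.length) :
    pvSeg cs a (n + 1) = pvSeg cs a n ++ [cs[n]] := by
  unfold pvSeg
  rw [List.take_add_one, List.getElem?_eq_getElem hn]
  rw [List.drop_append_of_le_length (by simp; omega)]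
  simp

theorem pvSeg_eq_take_drop (cs : List Char) (a m : Nat) :
    pvSeg cs a (a + m) = (cs.drop a).take m := by
  unfold pvSeg
  apply List.ext_getElem
  · simp
    omega
  · intro i h1 h2
    simp [List.getElem_drop, List.getElem_take]

-- the slices the ports take are segments
theorem pvSlice_eq_seg (cs : List Char) (a b : Nat) :
    PySem.List.slice cs (some (a : Int)) (some (b : Int)) = pvSeg cs a b := by
  rw [PySem.List.slice_natCast]
  unfold pvSeg
  apply List.ext_getElem
  · simp
    omega
  · intro i h1 h2
    simp [List.getElem_drop, List.getElem_take]

-- B's startswith test at p ↔ the pattern is a prefix of the suffix at p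
theorem pvPat_iff (cs : List Char) (p : Nat) :
    pvSeg cs p (p + 6) = pvFracPat ↔ pvFracPat <+: cs.drop p := by
  rw [pvSeg_eq_take_drop, List.prefix_iff_eq_take]
  have : pvFracPat.length = 6 := rfl
  rw [this]
  exact ⟨fun h => h.symm, fun h => h.symm⟩

-- A's inner depth-counting scan finds exactly the declarative first balanced close
theorem pvScanA_eq (cs : List Char) (k d : Nat) : pvScanA cs k d = pvFindClose cs k d := by
  rw [pvScanA]
  by_cases h : k < cs.length
  · simp only [h, dite_true]
    have hgetD : cs.getD k ' ' = cs[k] := pvGetD_eq cs ' ' h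
    by_cases hob : cs[k] = '{'
    · rw [if_pos hob, pvScanA_eq cs (k + 1) (d + 1)]
      unfold pvFindClose
      apply pvFind?_range_congr
      intro q hq
      rw [Bool.eq_iff_iff, pvIsClose_iff, pvIsClose_iff]
      by_cases hkq : k < q
      · have c1 : (pvSeg cs k q).count '}' = (pvSeg cs (k + 1) q).count '}' := by
          rw [pvSeg_cons cs h hkq, hob]
          simp [List.count_cons]
        have c2 : (pvSeg cs k q).count '{' = (pvSeg cs (k + 1) q).count '{' + 1 := by
          rw [pvSeg_cons cs h hkq, hob]
          simp [List.count_cons]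
        constructor <;> rintro ⟨h1, h2, h3⟩ <;> exact ⟨by omega, h2, by omega⟩
      · constructor
        · rintro ⟨h1, -, -⟩; omega
        · rintro ⟨h1, h2, -⟩
          have hqk : q = k := by omega
          subst hqk
          rw [hgetD, hob] at h2
          exact absurd h2 (by decide)
    · rw [if_neg hob]
      by_cases hcb : cs[k] = '}'
      · rw [if_pos hcb]
        by_cases hd : d = 0
        · subst hd
          rw [if_pos rfl]
          symm
          apply (pvFindClose_eq_some_iff cs k 0 k).mpr
          refine ⟨h, ?_, ?_⟩
          · rw [pvIsClose_iff]
            refine ⟨le_refl k, by rw [hgetD, hcb], ?_⟩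
            rw [pvSeg_self]
            simp
          · intro r hr
            apply pvIsClose_false
            rintro ⟨h1, -, -⟩
            omega
        · rw [if_neg hd, pvScanA_eq cs (k + 1) (d - 1)]
          unfold pvFindClose
          apply pvFind?_range_congr
          intro q hq
          rw [Bool.eq_iff_iff, pvIsClose_iff, pvIsClose_iff]
          by_cases hkq : k < q
          · have c1 : (pvSeg cs k q).count '}' = (pvSeg cs (k + 1) q).count '}' + 1 := by
              rw [pvSeg_cons cs h hkq, hcb]
              simp [List.count_cons]
            have c2 : (pvSeg cs k q).count '{' = (pvSeg cs (k + 1) q).count '{' := by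
              rw [pvSeg_cons cs h hkq, hcb]
              simp [List.count_cons]
            constructor <;> rintro ⟨h1, h2, h3⟩ <;> exact ⟨by omega, h2, by omega⟩
          · constructor
            · rintro ⟨h1, -, -⟩; omega
            · rintro ⟨h1, -, h3⟩
              have hqk : q = k := by omega
              subst hqk
              rw [pvSeg_self] at h3
              simp at h3
              omega
      · rw [if_neg hcb, pvScanA_eq cs (k + 1) d]
        unfold pvFindClose
        apply pvFind?_range_congr
        intro q hq
        rw [Bool.eq_iff_iff, pvIsClose_iff, pvIsClose_iff]
        by_cases hkq : k < q
        · have c1 : (pvSeg cs k q).count '}' = (pvSeg cs (k + 1) q).count '}' := by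
            rw [pvSeg_cons cs h hkq]
            simp [List.count_cons, hcb]
          have c2 : (pvSeg cs k q).count '{' = (pvSeg cs (k + 1) q).count '{' := by
            rw [pvSeg_cons cs h hkq]
            simp [List.count_cons, hob]
          constructor <;> rintro ⟨h1, h2, h3⟩ <;> exact ⟨by omega, h2, by omega⟩
        · constructor
          · rintro ⟨h1, -, -⟩; omega
          · rintro ⟨h1, h2, -⟩
            have hqk : q = k := by omega
            subst hqk
            rw [hgetD] at h2
            exact absurd h2 hcb
  · simp only [h, dite_false]
    symm
    unfold pvFindClose
    rw [pvFind?_range_none_iff]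
    intro q hq
    apply pvIsClose_false
    rintro ⟨h1, -, -⟩
    omega
termination_by cs.length - k
decreasing_by all_goals omega

-- no position closes at n unless cs[n] = '}'
theorem pvNoCloseAt (cs : List Char) {n : Nat} (hn : n < cs.length) (hc : cs[n] ≠ '}')
    (k d : Nat) : pvIsClose cs k d n = false := by
  apply pvIsClose_false
  rw [pvGetD_eq cs ' ' hn]
  tauto

-- a '{' whose declarative match is exactly now must still be on the stack
theorem pvOpenMem (cs : List Char) {n : Nat} {st : List Nat}
    (H1 : ∀ p, p ∈ st ↔ (p < n ∧ cs.getD p ' ' = '{' ∧ ∀ r, r < n → pvIsClose cs (p + 1) 0 r = false))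
    {p : Nat} (hp : cs.getD p ' ' = '{') (hf : pvFindClose cs (p + 1) 0 = some n) : p ∈ st := by
  rw [pvFindClose_eq_some_iff] at hf
  obtain ⟨hn, ht, hfst⟩ := hf
  rw [pvIsClose_iff] at ht
  exact (H1 p).mpr ⟨by omega, hp, hfst⟩

-- the table invariant survives a step at which no brace closes
theorem pvH3_succ (cs : List Char) (n : Nat) (tbl : PySem.Dict Nat Nat)
    (H3 : ∀ p q, tbl.get? p = some q ↔ (q < n ∧ cs.getD p ' ' = '{' ∧ pvFindClose cs (p + 1) 0 = some q))
    (hnew : ∀ p, cs.getD p ' ' = '{' → pvFindClose cs (p + 1) 0 = some n → False) :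
    ∀ p q, tbl.get? p = some q ↔ (q < n + 1 ∧ cs.getD p ' ' = '{' ∧ pvFindClose cs (p + 1) 0 = some q) := by
  intro p q
  rw [H3 p q]
  constructor
  · rintro ⟨h1, h2, h3⟩; exact ⟨by omega, h2, h3⟩
  · rintro ⟨h1, h2, h3⟩
    refine ⟨?_, h2, h3⟩
    rcases Nat.lt_or_ge q n with hq | hq
    · exact hq
    · have : q = n := by omega
      subst this
      exact absurd h3 (fun hf => hnew p h2 hf)

-- B's stack pass computes exactly the declarative matching table
theorem pvBuild_correct (cs : List Char) (n : Nat) (st : List Nat) (tbl : PySem.Dict Nat Nat)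
    (H1 : ∀ p, p ∈ st ↔ (p < n ∧ cs.getD p ' ' = '{' ∧ ∀ r, r < n → pvIsClose cs (p + 1) 0 r = false))
    (H2 : ∀ i, (hi : i < st.length) → (pvSeg cs (st[i] + 1) n).count '{' = (pvSeg cs (st[i] + 1) n).count '}' + i)
    (H3 : ∀ p q, tbl.get? p = some q ↔ (q < n ∧ cs.getD p ' ' = '{' ∧ pvFindClose cs (p + 1) 0 = some q)) :
    ∀ p q, (pvBuild cs n st tbl).get? p = some q ↔
      (cs.getD p ' ' = '{' ∧ pvFindClose cs (p + 1) 0 = some q) := by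
  intro p q
  rw [pvBuild.eq_def]
  by_cases h : n < cs.length
  · simp only [h, dite_true]
    have hgetD : cs.getD n ' ' = cs[n] := pvGetD_eq cs ' ' h
    have hmem_lt : ∀ p ∈ st, p < n := fun p hp => ((H1 p).mp hp).1
    by_cases hob : cs[n] = '{'
    · rw [if_pos hob]
      refine pvBuild_correct cs (n + 1) (n :: st) tbl ?_ ?_ ?_ p q
      · -- H1 for n :: st at n+1
        intro p
        rw [List.mem_cons]
        constructor
        · rintro (rfl | hp)
          · refine ⟨by omega, by rw [hgetD, hob], ?_⟩
            intro r hr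
            apply pvIsClose_false
            rintro ⟨h1, -, -⟩
            omega
          · obtain ⟨h1, h2, h3⟩ := (H1 p).mp hp
            refine ⟨by omega, h2, ?_⟩
            intro r hr
            rcases Nat.lt_or_ge r n with hrn | hrn
            · exact h3 r hrn
            · have : r = n := by omega
              subst this
              exact pvNoCloseAt cs h (by rw [hob]; decide) _ _
        · rintro ⟨h1, h2, h3⟩
          by_cases hpn : p = n
          · exact Or.inl hpn
          · exact Or.inr ((H1 p).mpr ⟨by omega, h2, fun r hr => h3 r (by omega)⟩)
      · -- H2 for n :: st at n+1
        intro i hi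
        rcases i with _ | i
        · simp only [List.getElem_cons_zero]
          rw [pvSeg_self]
          simp
        · simp only [List.getElem_cons_succ]
          have hi' : i < st.length := by simp at hi; omega
          have hlt : st[i] < n := hmem_lt _ (List.getElem_mem hi')
          rw [pvSeg_snoc cs (by omega) h, List.count_append, List.count_append, hob]
          have := H2 i hi'
          simp [List.count_cons]
          omega
      · -- H3 at n+1 (no brace closes at n)
        apply pvH3_succ cs n tbl H3
        intro p hp hf
        rw [pvFindClose_eq_some_iff] at hf
        have h2 := hf.2.1
        rw [pvNoCloseAt cs h (by rw [hob]; decide) _ _] at h2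
        exact absurd h2 (by simp)
    · rw [if_neg hob]
      by_cases hcb : cs[n] = '}'
      · rw [if_pos hcb]
        rcases st with _ | ⟨p0, rest⟩
        · refine pvBuild_correct cs (n + 1) [] tbl ?_ ?_ ?_ p q
          · intro p
            simp only [List.not_mem_nil, false_iff]
            rintro ⟨h1, h2, h3⟩
            by_cases hpn : p = n
            · subst hpn
              rw [hgetD, hcb] at h2
              exact absurd h2 (by decide)
            · have : p ∈ ([] : List Nat) :=
                (H1 p).mpr ⟨by omega, h2, fun r hr => h3 r (by omega)⟩
              simp at this
          · intro i hi; simp at hi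
          · apply pvH3_succ cs n tbl H3
            intro p hp hf
            have := pvOpenMem cs H1 hp hf
            simp at this
        · have hp0 := (H1 p0).mp (by simp)
          obtain ⟨hp0n, hp0b, hp0open⟩ := hp0
          have hbal0 : (pvSeg cs (p0 + 1) n).count '{' = (pvSeg cs (p0 + 1) n).count '}' := by
            have := H2 0 (by simp)
            simpa using this
          have hcl0 : pvIsClose cs (p0 + 1) 0 n = true := by
            rw [pvIsClose_iff]
            exact ⟨by omega, by rw [hgetD, hcb], by omega⟩
          have key : pvFindClose cs (p0 + 1) 0 = some n :=
            (pvFindClose_eq_some_iff cs (p0 + 1) 0 n).mpr ⟨h, hcl0, hp0open⟩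
          have hnoclose_rest : ∀ p ∈ rest, pvIsClose cs (p + 1) 0 n = false := by
            intro p hp
            rcases List.mem_iff_getElem.mp hp with ⟨i, hi, rfl⟩
            have hii : i + 1 < (p0 :: rest).length := by simp; omega
            have := H2 (i + 1) hii
            simp only [List.getElem_cons_succ] at this
            apply pvIsClose_false
            rintro ⟨-, -, hcnt⟩
            omega
          refine pvBuild_correct cs (n + 1) rest (tbl.insert p0 n) ?_ ?_ ?_ p q
          · -- H1 for rest at n+1
            intro p
            constructor
            · intro hp
              obtain ⟨h1, h2, h3⟩ := (H1 p).mp (List.mem_cons_of_mem _ hp)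
              refine ⟨by omega, h2, ?_⟩
              intro r hr
              rcases Nat.lt_or_ge r n with hrn | hrn
              · exact h3 r hrn
              · have : r = n := by omega
                subst this
                exact hnoclose_rest p hp
            · rintro ⟨h1, h2, h3⟩
              have hpn : p ≠ n := by
                intro hpn; subst hpn
                rw [hgetD, hcb] at h2
                exact absurd h2 (by decide)
              have hpst : p ∈ p0 :: rest :=
                (H1 p).mpr ⟨by omega, h2, fun r hr => h3 r (by omega)⟩
              rcases List.mem_cons.mp hpst with rfl | hp
              · have := h3 n (by omega)
                rw [hcl0] at this
                exact absurd this (by simp)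
              · exact hp
          · -- H2 for rest at n+1
            intro i hi
            have hii : i + 1 < (p0 :: rest).length := by simp; omega
            have hlt : rest[i] < n := by
              have := hmem_lt rest[i] (List.mem_cons_of_mem _ (List.getElem_mem hi))
              omega
            rw [pvSeg_snoc cs (by omega) h, List.count_append, List.count_append, hcb]
            have := H2 (i + 1) hii
            simp only [List.getElem_cons_succ] at this
            simp [List.count_cons]
            omega
          · -- H3 for tbl.insert p0 n at n+1
            intro p q
            rw [PySem.Dict.get?_insert]
            by_cases hpp : p = p0
            · subst hpp
              rw [if_pos rfl]
              constructor
              · intro hq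
                injection hq with hq
                subst hq
                exact ⟨by omega, hp0b, key⟩
              · rintro ⟨-, -, hf⟩
                rw [key] at hf
                injection hf with hf
                rw [hf]
            · rw [if_neg hpp, H3 p q]
              constructor
              · rintro ⟨h1, h2, h3⟩; exact ⟨by omega, h2, h3⟩
              · rintro ⟨h1, h2, h3⟩
                refine ⟨?_, h2, h3⟩
                rcases Nat.lt_or_ge q n with hq | hq
                · exact hq
                · have : q = n := by omega
                  subst this
                  have hpst := pvOpenMem cs H1 h2 h3
                  rcases List.mem_cons.mp hpst with rfl | hp
                  · exact absurd rfl hpp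
                  · have hno := hnoclose_rest p hp
                    rw [pvFindClose_eq_some_iff] at h3
                    rw [h3.2.1] at hno
                    exact absurd hno (by simp)
      · rw [if_neg hcb]
        refine pvBuild_correct cs (n + 1) st tbl ?_ ?_ ?_ p q
        · -- H1 unchanged at n+1
          intro p
          rw [H1 p]
          constructor
          · rintro ⟨h1, h2, h3⟩
            refine ⟨by omega, h2, ?_⟩
            intro r hr
            rcases Nat.lt_or_ge r n with hrn | hrn
            · exact h3 r hrn
            · have : r = n := by omega
              subst this
              exact pvNoCloseAt cs h hcb _ _
          · rintro ⟨h1, h2, h3⟩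
            have hpn : p ≠ n := by
              intro hpn; subst hpn
              rw [hgetD] at h2
              exact absurd h2 hob
            exact ⟨by omega, h2, fun r hr => h3 r (by omega)⟩
        · -- H2 unchanged at n+1
          intro i hi
          have hlt : st[i] < n := hmem_lt _ (List.getElem_mem hi)
          rw [pvSeg_snoc cs (by omega) h, List.count_append, List.count_append]
          have := H2 i hi
          simp [List.count_cons, hob, hcb]
          omega
        · apply pvH3_succ cs n tbl H3
          intro p hp hf
          rw [pvFindClose_eq_some_iff] at hf
          have h2 := hf.2.1
          rw [pvNoCloseAt cs h hcb _ _] at h2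
          exact absurd h2 (by simp)
  · simp only [h, dite_false]
    rw [H3 p q]
    constructor
    · rintro ⟨-, h2, h3⟩; exact ⟨h2, h3⟩
    · rintro ⟨h2, h3⟩
      have hq : q < cs.length := ((pvFindClose_eq_some_iff cs (p + 1) 0 q).mp h3).1
      exact ⟨by omega, h2, h3⟩
termination_by cs.length - n
decreasing_by all_goals omega

theorem pvFracOk_spec (cs : List Char) (p : Nat) (h : pvFracOk cs p = true) :
    ∃ q r, pvFindClose cs (p + 6) 0 = some q ∧ cs.getD (q + 1) ' ' = '{' ∧
      pvFindClose cs (q + 2) 0 = some r := by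
  unfold pvFracOk at h
  cases hq : pvFindClose cs (p + 6) 0 with
  | none => rw [hq] at h; simp at h
  | some q =>
    rw [hq] at h
    simp only [Bool.and_eq_true, beq_iff_eq, Option.isSome_iff_exists] at h
    obtain ⟨h1, r, h2⟩ := h
    exact ⟨q, r, rfl, h1, h2⟩

-- a good table: exactly the declarative matching pairs
def pvTblOk (cs : List Char) (tbl : PySem.Dict Nat Nat) : Prop :=
  ∀ p q, tbl.get? p = some q ↔ (cs.getD p ' ' = '{' ∧ pvFindClose cs (p + 1) 0 = some q)

theorem pvTblOk_bounds (cs : List Char) (tbl : PySem.Dict Nat Nat) (htbl : pvTblOk cs tbl)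
    {p q : Nat} (h : tbl.get? p = some q) : p < q ∧ q < cs.length := by
  obtain ⟨-, hf⟩ := (htbl p q).mp h
  rw [pvFindClose_eq_some_iff] at hf
  obtain ⟨hq, ht, -⟩ := hf
  rw [pvIsClose_iff] at ht
  exact ⟨by omega, hq⟩

-- enough fuel: the result of B's copy pass does not depend on the fuel
theorem pvGoB_stable (cs : List Char) (tbl : PySem.Dict Nat Nat) (htbl : pvTblOk cs tbl) :
    ∀ f f' i out, cs.length - i < f → cs.length - i < f' →
      pvGoB cs tbl f i out = pvGoB cs tbl f' i out := by
  intro f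
  induction f with
  | zero => intro f' i out hf hf'; omega
  | succ f ih =>
    intro f' i out hf hf'
    obtain ⟨f'', rfl⟩ : ∃ f'', f' = f'' + 1 := ⟨f' - 1, by omega⟩
    rw [pvGoB, pvGoB]
    by_cases h : i < cs.length
    · simp only [h, dite_true]
      by_cases hpat : pvSeg cs i (i + 6) = pvFracPat
      · rw [if_pos hpat, if_pos hpat]
        cases h1 : tbl.get? (i + 5) with
        | none => rfl
        | some q =>
          have hb1 := pvTblOk_bounds cs tbl htbl h1
          dsimp only
          by_cases hg : cs.length ≤ q + 1 ∨ cs.getD (q + 1) ' ' ≠ '{'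
          · rw [if_pos hg, if_pos hg]
          · rw [if_neg hg, if_neg hg]
            cases h2 : tbl.get? (q + 1) with
            | none => rfl
            | some r =>
              have hb2 := pvTblOk_bounds cs tbl htbl h2
              dsimp only
              exact ih f'' (r + 1) _ (by omega) (by omega)
      · rw [if_neg hpat, if_neg hpat]
        exact ih f'' (i + 1) _ (by omega) (by omega)
    · simp only [h, dite_false]

-- when no '\frac{' starts anywhere from i on, B copies the rest of the string
theorem pvGoB_tail (cs : List Char) (tbl : PySem.Dict Nat Nat) :
    ∀ f i out, cs.length - i < f →
      (∀ p, i ≤ p → pvSeg cs p (p + 6) ≠ pvFracPat) →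
      pvGoB cs tbl f i out = out ++ cs.drop i := by
  intro f
  induction f with
  | zero => intro i out hf hno; omega
  | succ f ih =>
    intro i out hf hno
    rw [pvGoB]
    by_cases h : i < cs.length
    · simp only [h, dite_true]
      rw [if_neg (hno i (le_refl i))]
      rw [ih (i + 1) _ (by omega) (fun p hp => hno p (by omega))]
      rw [List.drop_eq_getElem_cons h]
      simp
    · simp only [h, dite_false]
      rw [List.drop_eq_nil_of_le (by omega)]
      simp

-- when no '\frac{' starts in [i, e), B copies cs[i:e] verbatim
theorem pvGoB_copy (cs : List Char) (tbl : PySem.Dict Nat Nat) (htbl : pvTblOk cs tbl) :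
    ∀ f i e out, i ≤ e → e ≤ cs.length → cs.length - i < f →
      (∀ p, i ≤ p → p < e → pvSeg cs p (p + 6) ≠ pvFracPat) →
      pvGoB cs tbl f i out = pvGoB cs tbl f e (out ++ pvSeg cs i e) := by
  intro f
  induction f with
  | zero => intro i e out h1 h2 hf hno; omega
  | succ f ih =>
    intro i e out h1 h2 hf hno
    rcases Nat.eq_or_lt_of_le h1 with rfl | hie
    · rw [pvSeg_self, List.append_nil]
    · have hlt : i < cs.length := by omega
      conv_lhs => rw [pvGoB]
      simp only [hlt, dite_true]
      rw [if_neg (hno i (le_refl i) hie)]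
      rw [ih (i + 1) e _ (by omega) h2 (by omega) (fun p hp hpe => hno p (by omega) hpe)]
      rw [pvSeg_cons cs hlt hie]
      rw [show out ++ [cs[i]] ++ pvSeg cs (i + 1) e = out ++ (cs[i] :: pvSeg cs (i + 1) e) by simp]
      exact pvGoB_stable cs tbl htbl f (f + 1) e _ (by omega) (by omega)

-- the two loops compute the same output under the precondition
theorem pvGo_eq (cs : List Char)
    (hPre : ∀ p, p < cs.length → pvSeg cs p (p + 6) = pvFracPat → pvFracOk cs p = true)
    (tbl : PySem.Dict Nat Nat) (htbl : pvTblOk cs tbl) :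
    ∀ fA i out f, i ≤ cs.length → cs.length - i < fA → cs.length - i < f →
      pvGoA cs fA i out = pvGoB cs tbl f i out := by
  intro fA
  induction fA with
  | zero => intro i out f hi hfA hf; omega
  | succ fA ih =>
    intro i out f hi hfA hf
    rw [pvGoA]
    by_cases hpos : PySem.Chars.findFrom cs pvFracPat (i : Int) none = -1
    · simp only [hpos]
      have hnoinf : ¬ pvFracPat <:+: cs.drop i :=
        (PySem.Chars.findFrom_natCast_eq_neg_one_iff cs pvFracPat i hi).mp hpos
      rw [PySem.List.slice_from_natCast]
      symm
      apply pvGoB_tail cs tbl f i out hf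
      intro p hp hpat
      apply hnoinf
      have hpre : pvFracPat <+: cs.drop p := (pvPat_iff cs p).mp hpat
      have hsuf : cs.drop p <:+ cs.drop i := by
        rw [show p = i + (p - i) by omega, ← List.drop_drop]
        exact List.drop_suffix _ _
      exact hpre.isInfix.trans hsuf.isInfix
    · simp only [if_neg hpos]
      obtain ⟨hge, hprefix, hmin⟩ :=
        PySem.Chars.findFrom_natCast_spec cs pvFracPat i hi hpos
      set pos := PySem.Chars.findFrom cs pvFracPat (i : Int) none with hposdef
      have hpos0 : 0 ≤ pos := le_trans (by exact_mod_cast Int.natCast_nonneg i) hge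
      set a := pos.toNat with ha
      have hposa : pos = (a : Int) := (Int.toNat_of_nonneg hpos0).symm
      have hia : i ≤ a := by omega
      obtain ⟨t, ht⟩ := hprefix
      have hlen6 : a + 6 ≤ cs.length := by
        have := congrArg List.length ht
        simp [pvFracPat] at this
        omega
      have hpat : pvSeg cs a (a + 6) = pvFracPat := (pvPat_iff cs a).mpr ⟨t, ht⟩
      have hbrace5 : cs.getD (a + 5) ' ' = '{' := by
        have h5 : (cs.drop a)[5]? = some '{' := by
          rw [← ht]; simp [pvFracPat]
        rw [List.getElem?_drop] at h5
        rw [List.getD_eq_getElem?_getD, h5]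
        rfl
      obtain ⟨q, r, hfq, hq1, hfr2⟩ := pvFracOk_spec cs a (hPre a (by omega) hpat)
      have hqfacts := (pvFindClose_eq_some_iff cs (a + 6) 0 q).mp hfq
      have hqlt : q < cs.length := hqfacts.1
      have hqge : a + 6 ≤ q := by
        have := (pvIsClose_iff cs (a + 6) 0 q).mp hqfacts.2.1
        omega
      have hrfacts := (pvFindClose_eq_some_iff cs (q + 2) 0 r).mp hfr2
      have hrlt : r < cs.length := hrfacts.1
      have hrge : q + 2 ≤ r := by
        have := (pvIsClose_iff cs (q + 2) 0 r).mp hrfacts.2.1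
        omega
      have hq1lt : q + 1 < cs.length := by omega
      have e1 : a + 5 + 1 = a + 6 := by omega
      have e2 : q + 1 + 1 = q + 2 := by omega
      -- A's side: the frac branch fires and the scans find q and r
      have hscan1 : pvScanA cs (a + 5 + 1) 0 = some q := by
        rw [pvScanA_eq, e1]; exact hfq
      have hscan2 : pvScanA cs (q + 1 + 1) 0 = some r := by
        rw [pvScanA_eq, e2]; exact hfr2
      have hg1 : ¬ (cs.length ≤ a + 5 ∨ cs.getD (a + 5) ' ' ≠ '{') := by
        simp only [not_or, not_le, ne_eq, not_not]; exact ⟨by omega, hbrace5⟩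
      have hg2 : ¬ (cs.length ≤ q + 1 ∨ cs.getD (q + 1) ' ' ≠ '{') := by
        simp only [not_or, not_le, ne_eq, not_not]; exact ⟨by omega, hq1⟩
      rw [if_neg hg1]
      simp only [hscan1]
      rw [if_neg hg2]
      simp only [hscan2]
      -- B's side: copy up to a, then one table-driven step
      have hB1 : tbl.get? (a + 5) = some q := (htbl (a + 5) q).mpr ⟨hbrace5, by rw [e1]; exact hfq⟩
      have hB2 : tbl.get? (q + 1) = some r := (htbl (q + 1) r).mpr ⟨hq1, by rw [e2]; exact hfr2⟩
      have hcopy : ∀ p, i ≤ p → p < a → pvSeg cs p (p + 6) ≠ pvFracPat := by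
        intro p hp hpa hpat'
        exact hmin p (by exact_mod_cast hp) (by omega) ((pvPat_iff cs p).mp hpat')
      rw [pvGoB_copy cs tbl htbl f i a out hia (by omega) hf hcopy]
      obtain ⟨f', rfl⟩ : ∃ f', f = f' + 1 := ⟨f - 1, by omega⟩
      conv_rhs => rw [pvGoB]
      simp only [show a < cs.length by omega, dite_true, if_pos hpat]
      simp only [hB1]
      rw [if_neg hg2]
      simp only [hB2]
      -- both recurse at r+1 with the same accumulated output
      have hout : out ++ PySem.List.slice cs (some (i : Int)) (some pos) = out ++ pvSeg cs i a := by
        rw [hposa, pvSlice_eq_seg]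
      rw [hout, e2]
      exact ih (r + 1) _ f' (by omega) (by omega) (by omega)

-- ===== VERDICT (by name: the statement is the Claim_ definition above) =====
theorem latex_frac_to_parens2_py_spec : Claim_equal_latex_frac_to_parens2_py := by
  unfold Claim_equal_latex_frac_to_parens2_py
  intro s _ hPre
  unfold Spec_latex_frac_to_parens2_py latex_frac_to_parens2_py latex_frac_to_parens2_py_alt
  refine congrArg String.ofList ?_
  apply pvGo_eq s.toList hPre
  · exact pvBuild_correct s.toList 0 [] PySem.Dict.empty
      (by intro p
          simp only [List.not_mem_nil, false_iff]
          rintro ⟨h1, -, -⟩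
          omega)
      (by intro i hi; simp at hi)
      (by intro p q
          rw [PySem.Dict.get?_empty]
          constructor
          · intro h; simp at h
          · rintro ⟨h1, -, -⟩; omega)
  · omega
  · omega
  · omega
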